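-- pv_equiv track=rewrite | github.com/yan-ren/programming-class | python_demo_programs/class_2024_09_21_sat_100/2026/class_0117.py | is_valid_sunflower
-- ===== SOURCE A (Python) =====
-- def is_valid_sunflower(grid):
--     N = len(grid)
--     for r in range(N):
--         for c in range(N - 1):
--             if grid[r][c] >= grid[r][c + 1]:
--                 return False
--     for c in range(N):
--         for r in range(N - 1):
--             if grid[r][c] >= grid[r + 1][c]:
--                 return False
--
--     return True
-- ===== SOURCE B (Python) =====
-- def _strictly_increasing(xs):
--     # a list is strictly increasing iff it equals the sorted list of its distinct values
--     return xs == sorted(set(xs))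
--
-- def is_valid_sunflower(grid):
--     n = len(grid)
--     square = [row[:n] for row in grid]
--     lines = square + [list(col) for col in zip(*square)]
--     return all(_strictly_increasing(line) for line in lines)
-- ===== Notes on version B (the rewrite author's own statement) =====
-- stated objective: alternative
-- what changed: A's two index-arithmetic nested passes (adjacent comparisons along rows, then along columns) are replaced by a sorting/set characterization: truncate each row to n, transpose with zip, and test each line for strict increase via line == sorted(set(line)) - no adjacent comparison appears in B.
import Mathlib
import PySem

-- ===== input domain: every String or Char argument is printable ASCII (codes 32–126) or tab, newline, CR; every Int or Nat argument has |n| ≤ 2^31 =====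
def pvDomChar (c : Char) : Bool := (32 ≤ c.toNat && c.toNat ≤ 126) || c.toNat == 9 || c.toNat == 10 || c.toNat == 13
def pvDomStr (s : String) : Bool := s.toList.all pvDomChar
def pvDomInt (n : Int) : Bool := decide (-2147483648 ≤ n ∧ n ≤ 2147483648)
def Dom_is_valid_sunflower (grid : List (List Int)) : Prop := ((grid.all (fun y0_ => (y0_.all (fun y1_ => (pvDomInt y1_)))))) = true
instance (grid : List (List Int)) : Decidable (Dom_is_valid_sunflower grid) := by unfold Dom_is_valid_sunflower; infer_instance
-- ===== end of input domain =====

-- B replaces A's two index-based adjacent-comparison passes by a sorting/set characterization: each line (truncated rows and zip-transposed columns) must equal sorted(set(line)); objective: alternative algorithm, same work up to a log factor.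


-- ===== PORT A =====
-- grid[r][c]; the 0/[] defaults are unreachable on inputs satisfying Pre_is_valid_sunflower
def pvCellA (grid : List (List Int)) (r c : Int) : Int :=
  PySem.List.pyGetD (PySem.List.pyGetD grid r []) c 0

def is_valid_sunflower (grid : List (List Int)) : Bool :=
  let N : Int := grid.length
  ((PySem.List.pyRange 0 N 1).all fun r =>
    (PySem.List.pyRange 0 (N - 1) 1).all fun c =>
      !decide (pvCellA grid r c ≥ pvCellA grid r (c + 1))) &&
  ((PySem.List.pyRange 0 N 1).all fun c =>
    (PySem.List.pyRange 0 (N - 1) 1).all fun r =>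
      !decide (pvCellA grid r c ≥ pvCellA grid (r + 1) c))

-- ===== PORT B =====
-- xs == sorted(set(xs))
def pvStrictInc (xs : List Int) : Bool :=
  xs == PySem.List.sorted (PySem.Set.ofList xs) (fun x => x) false

-- zip(*rows): columns up to the shortest row, ported as the corresponding index map
def pvZipStar (rows : List (List Int)) : List (List Int) :=
  match rows with
  | [] => []
  | r :: rs =>
    (List.range (rs.foldl (fun m l => min m l.length) r.length)).map
      (fun j => (r :: rs).map (fun row => row.getD j 0))

def is_valid_sunflower_alt (grid : List (List Int)) : Bool :=
  let n : Int := grid.length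
  let square := grid.map (fun row => PySem.List.slice row none (some n))
  (square ++ pvZipStar square).all pvStrictInc

-- ===== PRECONDITION & SPEC =====
-- Pre_ is exactly the set of inputs where A returns (elsewhere A raises IndexError on a too-short
-- row): either the grid is trivial (≤ 1 row), or every row has at least len(grid) entries, or some
-- row r — with all rows before it long enough — contains an adjacent non-increasing pair that A's
-- first pass reaches before any out-of-range access.
def Pre_is_valid_sunflower (grid : List (List Int)) : Prop :=
  grid.length ≤ 1 ∨
  (∀ row ∈ grid, grid.length ≤ row.length) ∨
  (∃ r < grid.length, (∀ row ∈ grid.take r, grid.length ≤ row.length) ∧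
    ∃ c < (grid.getD r []).length, c + 1 < (grid.getD r []).length ∧ c + 1 < grid.length ∧
      (grid.getD r []).getD (c + 1) 0 ≤ (grid.getD r []).getD c 0)
instance (grid : List (List Int)) : Decidable (Pre_is_valid_sunflower grid) := by
  unfold Pre_is_valid_sunflower; infer_instance

def pvWitness_is_valid_sunflower : List (List Int) := [[1, 2], [3, 4]]

def Spec_is_valid_sunflower (grid : List (List Int)) (out : Bool) : Prop := out = is_valid_sunflower_alt grid
instance (grid : List (List Int)) (out : Bool) : Decidable (Spec_is_valid_sunflower grid out) := by unfold Spec_is_valid_sunflower; infer_instance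

-- ===== CLAIM (what is proved, stated in full; the proofs are below) =====
def Claim_equal_is_valid_sunflower : Prop := ∀ (grid : List (List Int)), Dom_is_valid_sunflower grid → Pre_is_valid_sunflower grid → Spec_is_valid_sunflower grid (is_valid_sunflower grid)

-- ===== LEMMAS AND PROOFS =====

-- set(xs) of a duplicate-free list is xs itself
theorem pv_ofList_nodup (acc xs : List Int) (h : (acc ++ xs).Nodup) :
    xs.foldl PySem.Set.add acc = acc ++ xs := by
  induction xs generalizing acc with
  | nil => simp
  | cons x xs ih =>
    have hx : x ∉ acc := by
      intro hmem
      exact (List.disjoint_of_nodup_append h) hmem (by simp)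
    have hadd : PySem.Set.add acc x = acc ++ [x] := by
      simp [PySem.Set.add, PySem.Set.contains, hx]
    rw [List.foldl_cons, hadd, ih (acc ++ [x]) (by simpa using h)]
    simp

theorem pvStrictInc_iff (xs : List Int) :
    pvStrictInc xs = true ↔ xs.Pairwise (· < ·) := by
  constructor
  · intro h
    have heq : xs = PySem.List.sorted (PySem.Set.ofList xs) (fun x => x) false := by
      simpa [pvStrictInc] using h
    have hp := PySem.List.sorted_ofList_pairwise_lt (xs := xs)
    rw [← heq] at hp
    exact hp
  · intro hp
    have hnd : xs.Nodup := hp.imp ne_of_lt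
    have hof : PySem.Set.ofList xs = xs := by
      have := pv_ofList_nodup [] xs (by simpa using hnd)
      simpa [PySem.Set.ofList_eq_foldl] using this
    have : PySem.List.sorted (PySem.Set.ofList xs) (fun x => x) false = xs := by
      rw [hof]
      exact PySem.List.sorted_eq_of_perm_of_pairwise_lt xs xs (fun x => x) (List.Perm.refl xs) hp
    simp [pvStrictInc, this]

-- strict pairwise order on Int is the adjacent condition
theorem pv_pairwise_lt_iff_adj (l : List Int) :
    l.Pairwise (· < ·) ↔ ∀ i, (h : i + 1 < l.length) → l[i] < l[i + 1] := by
  rw [← List.isChain_iff_pairwise, List.isChain_iff_getElem]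

theorem pv_foldl_min_const (n : Nat) (rs : List (List Int)) (h : ∀ l ∈ rs, l.length = n) :
    rs.foldl (fun m l => min m l.length) n = n := by
  induction rs with
  | nil => rfl
  | cons r rs ih =>
    have hr : r.length = n := h r (by simp)
    simp only [List.foldl_cons, hr, min_self]
    exact ih (fun l hl => h l (by simp [hl]))

-- every column produced by zip(*rows) has one entry per row
theorem pvZipStar_mem_length (rows : List (List Int)) (col : List Int)
    (h : col ∈ pvZipStar rows) : col.length = rows.length := by
  cases rows with
  | nil => simp [pvZipStar] at h
  | cons r rs =>
    simp only [pvZipStar, List.mem_map] at h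
    obtain ⟨j, -, rfl⟩ := h
    simp

-- zip(*rows) on equal-length nonempty rows is the index-map transpose
theorem pvZipStar_eq_cols (rows : List (List Int)) (n : Nat) (hne : rows ≠ [])
    (hlen : ∀ l ∈ rows, l.length = n) :
    pvZipStar rows = (List.range n).map (fun j => rows.map (fun row => row.getD j 0)) := by
  cases rows with
  | nil => exact absurd rfl hne
  | cons r rs =>
    have hr : r.length = n := hlen r (by simp)
    simp only [pvZipStar]
    rw [hr, pv_foldl_min_const n rs (fun l hl => hlen l (by simp [hl]))]

-- pvCellA at natural indices is plain getD-indexing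
theorem pvCellA_natCast (grid : List (List Int)) (r c : Nat) :
    pvCellA grid (r : Int) (c : Int) = (grid.getD r []).getD c 0 := by
  simp [pvCellA, PySem.List.pyGetD_natCast]

-- B unfolded: every truncated row and every zip-column passes pvStrictInc
theorem pvB_iff (grid : List (List Int)) :
    is_valid_sunflower_alt grid = true ↔
      (∀ row ∈ grid, ((row.take grid.length).Pairwise (· < ·))) ∧
      (∀ col ∈ pvZipStar (grid.map (fun row => row.take grid.length)),
        col.Pairwise (· < ·)) := by
  simp only [is_valid_sunflower_alt, List.all_append, Bool.and_eq_true, List.all_eq_true,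
    List.mem_map, PySem.List.slice_to_natCast, pvStrictInc_iff]
  constructor
  · rintro ⟨h1, h2⟩
    exact ⟨fun row hrow => h1 _ ⟨row, hrow, rfl⟩, fun col hcol => h2 col hcol⟩
  · rintro ⟨h1, h2⟩
    exact ⟨by rintro _ ⟨row, hrow, rfl⟩; exact h1 row hrow, h2⟩

-- the two ports agree on every input satisfying Pre_
theorem pv_main (grid : List (List Int)) (hpre : Pre_is_valid_sunflower grid) :
    is_valid_sunflower grid = is_valid_sunflower_alt grid := by
  rw [Bool.eq_iff_iff, pvB_iff]
  simp only [is_valid_sunflower, Bool.and_eq_true, List.all_eq_true,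
    PySem.List.mem_pyRange_one, Bool.not_eq_true', decide_eq_false_iff_not, not_le]
  rcases hpre with h1 | h2 | h3
  · -- trivial grids (≤ 1 row): every line has at most one element, both sides are True
    constructor
    · rintro -
      constructor
      · intro row hrow
        rw [pv_pairwise_lt_iff_adj]
        intro i hi
        simp only [List.length_take] at hi
        omega
      · intro col hcol
        have hlen := pvZipStar_mem_length _ _ hcol
        simp only [List.length_map] at hlen
        rw [pv_pairwise_lt_iff_adj]
        intro i hi
        omega
    · rintro -
      exact ⟨fun r hr c hc => absurd hc (by omega), fun c hc r hr => absurd hr (by omega)⟩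
  · -- every row long enough: both sides say the n×n top-left square is strictly increasing
    by_cases hg : grid = []
    · subst hg
      constructor
      · rintro -
        exact ⟨by simp, by simp [pvZipStar]⟩
      · rintro -
        refine ⟨fun r hr => ?_, fun c hc => ?_⟩
        · exfalso
          simp only [List.length_nil, Int.natCast_zero] at hr
          omega
        · exfalso
          simp only [List.length_nil, Int.natCast_zero] at hc
          omega
    · have hsq : ∀ l ∈ grid.map (fun row => row.take grid.length), l.length = grid.length := by
        intro l hl
        rcases List.mem_map.mp hl with ⟨row, hrow, rfl⟩
        have := h2 row hrow
        simp only [List.length_take]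
        omega
      have hzip := pvZipStar_eq_cols _ grid.length
        (by simpa [List.map_eq_nil_iff] using hg) hsq
      rw [hzip]
      constructor
      · rintro ⟨hA1, hA2⟩
        constructor
        · intro row hrow
          rcases List.mem_iff_getElem.mp hrow with ⟨r, hr, rfl⟩
          have hlen : grid.length ≤ (grid[r]'hr).length := h2 _ (List.getElem_mem hr)
          rw [pv_pairwise_lt_iff_adj]
          intro i hi
          simp only [List.length_take] at hi
          have h := hA1 (r : Int) ⟨by omega, by omega⟩ (i : Int) ⟨by omega, by omega⟩
          rw [pvCellA_natCast, show ((i : Int) + 1) = ((i + 1 : Nat) : Int) by push_cast; ring,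
            pvCellA_natCast, List.getD_eq_getElem _ _ hr] at h
          rw [List.getD_eq_getElem _ _ (by omega), List.getD_eq_getElem _ _ (by omega)] at h
          simpa [List.getElem_take] using h
        · intro col hcol
          rcases List.mem_map.mp hcol with ⟨j, hj, rfl⟩
          have hjn : j < grid.length := List.mem_range.mp hj
          rw [pv_pairwise_lt_iff_adj]
          intro i hi
          simp only [List.length_map] at hi
          simp only [List.getElem_map]
          have hl1 : grid.length ≤ (grid[i]'(by omega)).length := h2 _ (List.getElem_mem _)
          have hl2 : grid.length ≤ (grid[i + 1]'(by omega)).length := h2 _ (List.getElem_mem _)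
          have h := hA2 (j : Int) ⟨by omega, by omega⟩ (i : Int) ⟨by omega, by omega⟩
          rw [pvCellA_natCast, show ((i : Int) + 1) = ((i + 1 : Nat) : Int) by push_cast; ring,
            pvCellA_natCast] at h
          rw [List.getD_eq_getElem _ _ (show i < grid.length by omega),
            List.getD_eq_getElem _ _ (show i + 1 < grid.length by omega)] at h
          rw [List.getD_eq_getElem _ _ (by omega), List.getD_eq_getElem _ _ (by omega)] at h
          rw [List.getD_eq_getElem _ _ (by simp only [List.length_take]; omega),
            List.getD_eq_getElem _ _ (by simp only [List.length_take]; omega)]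
          simpa [List.getElem_take] using h
      · rintro ⟨hB1, hB2⟩
        constructor
        · intro r hr c hc
          have hrN : r.toNat < grid.length := by omega
          have hlen : grid.length ≤ (grid[r.toNat]'hrN).length := h2 _ (List.getElem_mem _)
          have h := (pv_pairwise_lt_iff_adj _).mp (hB1 _ (List.getElem_mem hrN)) c.toNat
            (by simp only [List.length_take]; omega)
          rw [List.getElem_take, List.getElem_take] at h
          rw [show r = ((r.toNat : Nat) : Int) by omega, show c = ((c.toNat : Nat) : Int) by omega,
            show ((c.toNat : Nat) : Int) + 1 = ((c.toNat + 1 : Nat) : Int) by push_cast; ring,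
            pvCellA_natCast, pvCellA_natCast, List.getD_eq_getElem _ _ hrN]
          rw [List.getD_eq_getElem _ _ (by omega), List.getD_eq_getElem _ _ (by omega)]
          exact h
        · intro c hc r hr
          have hrN : r.toNat + 1 < grid.length := by omega
          have hl1 : grid.length ≤ (grid[r.toNat]'(by omega)).length := h2 _ (List.getElem_mem _)
          have hl2 : grid.length ≤ (grid[r.toNat + 1]'hrN).length := h2 _ (List.getElem_mem _)
          have hcolmem : (grid.map (fun row => row.take grid.length)).map
              (fun row => row.getD c.toNat 0) ∈
              (List.range grid.length).map (fun j =>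
                (grid.map (fun row => row.take grid.length)).map (fun row => row.getD j 0)) :=
            List.mem_map.mpr ⟨c.toNat, List.mem_range.mpr (by omega), rfl⟩
          have h := (pv_pairwise_lt_iff_adj _).mp (hB2 _ hcolmem) r.toNat
            (by simp only [List.length_map]; omega)
          simp only [List.getElem_map] at h
          rw [List.getD_eq_getElem _ _ (by simp only [List.length_take]; omega),
            List.getD_eq_getElem _ _ (by simp only [List.length_take]; omega),
            List.getElem_take, List.getElem_take] at h
          rw [show c = ((c.toNat : Nat) : Int) by omega, show r = ((r.toNat : Nat) : Int) by omega,
            show ((r.toNat : Nat) : Int) + 1 = ((r.toNat + 1 : Nat) : Int) by push_cast; ring,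
            pvCellA_natCast, pvCellA_natCast,
            List.getD_eq_getElem _ _ (show r.toNat < grid.length by omega),
            List.getD_eq_getElem _ _ hrN]
          rw [List.getD_eq_getElem _ _ (by omega), List.getD_eq_getElem _ _ (by omega)]
          exact h
  · -- a violation reachable by A's first pass: both sides are False
    obtain ⟨r, hr, -, c, hcl, hc1, hcn, hviol⟩ := h3
    apply iff_of_false
    · rintro ⟨hA1, -⟩
      have h := hA1 (r : Int) ⟨by omega, by omega⟩ (c : Int) ⟨by omega, by omega⟩
      rw [pvCellA_natCast, show ((c : Int) + 1) = ((c + 1 : Nat) : Int) by push_cast; ring,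
        pvCellA_natCast] at h
      omega
    · rintro ⟨hB1, -⟩
      have hrow : grid.getD r [] ∈ grid := by
        rw [List.getD_eq_getElem _ _ hr]
        exact List.getElem_mem hr
      have h := (pv_pairwise_lt_iff_adj _).mp (hB1 _ hrow) c
        (by simp only [List.length_take]; omega)
      rw [List.getElem_take, List.getElem_take] at h
      rw [List.getD_eq_getElem _ _ (by omega : c + 1 < (grid.getD r []).length),
        List.getD_eq_getElem _ _ (by omega : c < (grid.getD r []).length)] at hviol
      omega

-- ===== VERDICT (by name: the statement is the Claim_ definition above) =====
theorem is_valid_sunflower_spec : Claim_equal_is_valid_sunflower := by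
  intro grid _ hpre
  unfold Spec_is_valid_sunflower
  exact pv_main grid hpre
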